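-- pv_equiv track=rewrite | github.com/SeyoungKo/Algorithm-ProblemSolving | heap/more_hot.py | solution
-- ===== SOURCE A (Python) =====
-- import heapq
--
-- def solution(scoville, K):
--     answer = 0
--     heapq.heapify(scoville)
--
--     while True:
--         min_val1 = heapq.heappop(scoville)
--
--         if min_val1 >= K:
--             break
--         if len(scoville) <= 0:
--             return -1
--
--         min_val2 = heapq.heappop(scoville)
--         heapq.heappush(scoville, min_val1 + min_val2 * 2)
--         answer += 1
--     return answer
-- ===== SOURCE B (Python) =====
-- def solution(scoville, K):
--     # sorted-list strategy: sort once, pop the two front elements each round and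
--     # re-insert the mixed value at its sorted position (no heap).
--     s = sorted(scoville)
--     answer = 0
--     while True:
--         m1 = s.pop(0)          # IndexError on empty input, same as A
--         if m1 >= K:
--             return answer
--         if not s:
--             return -1
--         m2 = s.pop(0)
--         v = m1 + m2 * 2
--         i = 0
--         while i < len(s) and s[i] <= v:
--             i += 1
--         s.insert(i, v)
--         answer += 1
-- ===== Notes on version B (the rewrite author's own statement) =====
-- stated objective: alternative
-- what changed: Replaces the binary heap with a list sorted once up front: each round pops the two front (smallest) elements and re-inserts the mixed value at its sorted position via a linear scan, so no heap structure is maintained.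
import Mathlib
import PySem

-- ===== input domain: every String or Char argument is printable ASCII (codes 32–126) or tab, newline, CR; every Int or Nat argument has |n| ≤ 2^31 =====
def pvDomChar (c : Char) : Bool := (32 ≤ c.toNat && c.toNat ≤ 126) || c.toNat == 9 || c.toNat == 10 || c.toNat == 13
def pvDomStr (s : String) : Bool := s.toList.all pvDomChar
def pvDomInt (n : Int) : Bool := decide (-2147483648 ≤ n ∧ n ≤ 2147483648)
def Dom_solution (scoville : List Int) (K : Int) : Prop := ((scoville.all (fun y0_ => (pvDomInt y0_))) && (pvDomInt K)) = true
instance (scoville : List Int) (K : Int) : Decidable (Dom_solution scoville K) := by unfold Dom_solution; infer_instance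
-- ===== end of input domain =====

-- B replaces the heap with a list kept sorted (sort once, pop the two front
-- elements, insert the mix at its sorted position): objective "alternative".
-- A mutates its argument in place (heapify/pop/push); the equivalence proved
-- here is about the RETURN value only.

-- ===== PORT A =====
-- heapq is not in PySem; it is modelled by its observable specification:
-- heappop returns the heap minimum (one occurrence removed), heappush appends.
-- This is exact for the returned `answer`, which depends only on the multiset
-- of values in the heap, never on the heap array's internal layout.

-- min(a :: t), as the running minimum heapq maintains at the root
def listMin (a : Int) (t : List Int) : Int := t.foldl min a

-- needed by the termination argument of solutionGo (cited in decreasing_by)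
theorem listMin_mem (a : Int) (t : List Int) : listMin a t ∈ a :: t := by
  induction t generalizing a with
  | nil => simp [listMin]
  | cons x t ih =>
    have h := ih (min a x)
    simp only [listMin, List.foldl_cons] at *
    rw [List.mem_cons] at h
    rcases h with h | h
    · rcases min_choice a x with hm | hm <;> rw [hm] at h <;> simp [h, hm]
    · simp [h]

def solutionGo (K : Int) : List Int → Int → Int
  | [], _ => -1                     -- heappop of an empty heap: IndexError, excluded by Pre_
  | a :: t, answer =>
    let m1 := listMin a t           -- min_val1 = heapq.heappop(scoville)
    let h1 := (a :: t).erase m1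
    if K ≤ m1 then answer           -- if min_val1 >= K: break
    else if h1.length ≤ 0 then -1   -- if len(scoville) <= 0: return -1
    else
      let m2 := listMin h1.headI h1.tail        -- min_val2 = heapq.heappop(scoville)
      solutionGo K ((h1.erase m2) ++ [m1 + m2 * 2]) (answer + 1)  -- heappush(scoville, min_val1 + min_val2*2)
  termination_by h _ => h.length
  decreasing_by
    rename_i hne
    have l0 : ((a :: t).erase (listMin a t)).length = t.length := by
      rw [List.length_erase_of_mem (listMin_mem a t)]; simp
    have hne2 : (a :: t).erase (listMin a t) ≠ [] := fun hh => hne (by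
      show ((a :: t).erase (listMin a t)).length ≤ 0
      rw [hh]; simp)
    obtain ⟨b, u, hbu⟩ := List.exists_cons_of_ne_nil hne2
    have hm2 : listMin ((a :: t).erase (listMin a t)).headI ((a :: t).erase (listMin a t)).tail
        ∈ (a :: t).erase (listMin a t) := by
      rw [hbu]; simpa using listMin_mem b u
    have l2 := List.length_erase_of_mem hm2
    have l3 : ((a :: t).erase (listMin a t)).length = u.length + 1 := by rw [hbu]; simp
    simp only [List.length_append, List.length_cons, List.length_nil, l2, l0]
    omega

def solution (scoville : List Int) (K : Int) : Int :=
  solutionGo K scoville 0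

-- ===== PORT B =====
-- insert v into a ≤-sorted list after all elements ≤ v (Source B's scan-and-insert loop)
def insSorted (v : Int) : List Int → List Int
  | [] => [v]
  | b :: u => if b ≤ v then b :: insSorted v u else v :: b :: u

-- needed by the termination argument of solutionAltGo
theorem length_insSorted (v : Int) (l : List Int) : (insSorted v l).length = l.length + 1 := by
  induction l with
  | nil => rfl
  | cons b u ih => simp only [insSorted]; split <;> simp [ih]

def solutionAltGo (K : Int) : List Int → Int → Int
  | [], _ => -1                                 -- s.pop(0) on empty: IndexError, excluded by Pre_
  | [m1], answer => if K ≤ m1 then answer else -1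
  | m1 :: m2 :: s2, answer =>
    if K ≤ m1 then answer
    else solutionAltGo K (insSorted (m1 + m2 * 2) s2) (answer + 1)
  termination_by s _ => s.length
  decreasing_by simp [length_insSorted]

def solution_alt (scoville : List Int) (K : Int) : Int :=
  solutionAltGo K (PySem.List.sorted scoville (fun x => x) false) 0

-- ===== PRECONDITION & SPEC =====
-- Pre_ excludes only the empty list, on which both Pythons raise IndexError.
def Pre_solution (scoville : List Int) (K : Int) : Prop := scoville ≠ []
instance (scoville : List Int) (K : Int) : Decidable (Pre_solution scoville K) := by
  unfold Pre_solution; infer_instance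

def pvWitness_solution : List Int × Int := ([1, 2, 3, 9, 10, 12], 7)

def Spec_solution (scoville : List Int) (K : Int) (out : Int) : Prop := out = solution_alt scoville K
instance (scoville : List Int) (K : Int) (out : Int) : Decidable (Spec_solution scoville K out) := by unfold Spec_solution; infer_instance

-- ===== CLAIM (what is proved, stated in full; the proofs are below) =====
def Claim_equal_solution : Prop := ∀ (scoville : List Int) (K : Int), Dom_solution scoville K → Pre_solution scoville K → Spec_solution scoville K (solution scoville K)

-- ===== LEMMAS AND PROOFS =====

theorem listMin_le (a : Int) (t : List Int) (y : Int) (hy : y ∈ a :: t) : listMin a t ≤ y := by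
  induction t generalizing a y with
  | nil => simp at hy; simp [listMin, hy]
  | cons x t ih =>
    have hmin : listMin (min a x) t ≤ min a x := ih (min a x) (min a x) (List.mem_cons_self ..)
    simp only [listMin, List.foldl_cons] at *
    rcases List.mem_cons.1 hy with rfl | hy2
    · exact le_trans hmin (min_le_left _ _)
    rcases List.mem_cons.1 hy2 with rfl | hy3
    · exact le_trans hmin (min_le_right _ _)
    · exact ih (min a x) y (List.mem_cons_of_mem _ hy3)

-- the minimum of a multiset is the head of any sorted arrangement
theorem listMin_eq_head (a : Int) (t : List Int) (m1 : Int) (s1 : List Int)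
    (hp : (m1 :: s1).Perm (a :: t)) (hs : (m1 :: s1).Pairwise (· ≤ ·)) :
    listMin a t = m1 := by
  have hmem : listMin a t ∈ m1 :: s1 := hp.mem_iff.2 (listMin_mem a t)
  have h1 : m1 ≤ listMin a t := by
    rcases List.mem_cons.1 hmem with h | h
    · rw [h]
    · exact List.rel_of_pairwise_cons hs h
  have h2 : listMin a t ≤ m1 := listMin_le a t m1 (hp.mem_iff.1 (List.mem_cons_self ..))
  exact le_antisymm h2 h1

theorem insSorted_perm (v : Int) (l : List Int) : (insSorted v l).Perm (v :: l) := by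
  induction l with
  | nil => exact List.Perm.refl _
  | cons b u ih =>
    simp only [insSorted]
    split
    · exact (ih.cons b).trans (List.Perm.swap _ _ _)
    · exact List.Perm.refl _

theorem insSorted_pairwise (v : Int) (l : List Int) (h : l.Pairwise (· ≤ ·)) :
    (insSorted v l).Pairwise (· ≤ ·) := by
  induction l with
  | nil => simp [insSorted]
  | cons b u ih =>
    have hb : ∀ y ∈ u, b ≤ y := fun y hy => List.rel_of_pairwise_cons h hy
    have hu : u.Pairwise (· ≤ ·) := h.of_cons
    simp only [insSorted]
    split
    · rename_i hbv
      refine List.pairwise_cons.2 ⟨fun y hy => ?_, ih hu⟩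
      rcases List.mem_cons.1 ((insSorted_perm v u).mem_iff.1 hy) with rfl | hy2
      · exact hbv
      · exact hb y hy2
    · rename_i hbv
      have hvb : v ≤ b := le_of_lt (lt_of_not_ge hbv)
      refine List.pairwise_cons.2 ⟨fun y hy => ?_, h⟩
      rcases List.mem_cons.1 hy with rfl | hy2
      · exact hvb
      · exact le_trans hvb (hb y hy2)

theorem go_eq (K : Int) (n : Nat) : ∀ (h s : List Int) (ans : Int),
    h.length ≤ n → s.Perm h → s.Pairwise (· ≤ ·) →
    solutionGo K h ans = solutionAltGo K s ans := by
  induction n with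
  | zero =>
    intro h s ans hlen hperm _
    have hh : h = [] := List.eq_nil_of_length_eq_zero (Nat.le_zero.1 hlen)
    subst hh
    have hs : s = [] := hperm.eq_nil
    subst hs
    rw [solutionGo, solutionAltGo]
  | succ n ih =>
    intro h s ans hlen hperm hsort
    cases s with
    | nil =>
      have hh : h = [] := hperm.symm.eq_nil
      subst hh
      rw [solutionGo, solutionAltGo]
    | cons m1 s1 =>
      cases h with
      | nil => exact (List.cons_ne_nil _ _ hperm.eq_nil).elim
      | cons a t =>
        have hm1 : listMin a t = m1 := listMin_eq_head a t m1 s1 hperm hsort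
        have hper1 : s1.Perm ((a :: t).erase m1) := by
          have := hperm.erase m1
          rwa [List.erase_cons_head] at this
        rw [solutionGo]
        simp only [hm1]
        by_cases hK : K ≤ m1
        · cases s1 with
          | nil => simp [solutionAltGo, hK]
          | cons m2 s2 => simp [solutionAltGo, hK]
        · cases s1 with
          | nil =>
            have he : (a :: t).erase m1 = [] := hper1.symm.eq_nil
            simp [solutionAltGo, hK, he]
          | cons m2 s2 =>
            have hene : (a :: t).erase m1 ≠ [] := by
              intro hh; rw [hh] at hper1
              exact List.cons_ne_nil _ _ hper1.eq_nil
            obtain ⟨b, u, hbu⟩ := List.exists_cons_of_ne_nil hene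
            have hper1' : (m2 :: s2).Perm (b :: u) := hbu ▸ hper1
            have hm2 : listMin b u = m2 :=
              listMin_eq_head b u m2 s2 hper1' hsort.of_cons
            have hlent : ((a :: t).erase m1).length = t.length := by
              rw [List.length_erase_of_mem (hm1 ▸ listMin_mem a t)]; simp
            have hu1 : u.length + 1 = t.length := by
              rw [hbu] at hlent; simpa using hlent
            have hper2 : s2.Perm ((b :: u).erase m2) := by
              have := hper1'.erase m2
              rwa [List.erase_cons_head] at this
            have hlen2 : ((b :: u).erase m2).length = u.length := by
              rw [List.length_erase_of_mem (hm2 ▸ listMin_mem b u)]; simp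
            have hrec := ih (((b :: u).erase m2) ++ [m1 + m2 * 2])
              (insSorted (m1 + m2 * 2) s2) (ans + 1)
              (by
                have h2 : t.length + 1 ≤ n + 1 := by simpa using hlen
                have e1 : (((b :: u).erase m2) ++ [m1 + m2 * 2]).length = u.length + 1 := by
                  simp [hlen2]
                rw [e1]
                omega)
              (((insSorted_perm _ s2).trans (hper2.cons _)).trans
                (List.perm_append_singleton _ _).symm)
              (insSorted_pairwise _ s2 hsort.of_cons.of_cons)
            simp only [solutionAltGo, hK, hbu]
            simp only [List.headI, List.tail, hm2, List.length_cons]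
            simpa [hK] using hrec

-- ===== VERDICT (by name: the statement is the Claim_ definition above) =====
theorem solution_spec : Claim_equal_solution := by
  intro scoville K _ _
  unfold Spec_solution solution solution_alt
  exact go_eq K scoville.length scoville _ 0 le_rfl
    (PySem.List.sorted_perm ..) (by simpa using PySem.List.sorted_pairwise (xs := scoville) (key := fun x => x))
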